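-- pv_equiv track=rewrite | github.com/josephdeville/VistasocialContentEngine | scripts/process-all-companies.py | generate_value_props
-- ===== SOURCE A (Python) =====
-- def generate_value_props(company_data):
--     """Generate 3 named value props based on ICP pain points"""
--     icp = company_data.get('ICP', '')
--     value_prop = company_data.get('Value_Proposition', '')
--
--     # Extract key pain points from value prop
--     props = []
--
--     # Common patterns
--     if 'automate' in value_prop.lower():
--         props.append("The Manual Process Tax - Spending 20+ hrs/week on work that should be automated")
--     if 'scale' in value_prop.lower() or 'scaling' in value_prop.lower():
--         props.append("The Scaling Wall - What worked at 10X breaks at 100X")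
--     if 'attribution' in value_prop.lower() or 'visibility' in value_prop.lower():
--         props.append("The Attribution Black Hole - Can't connect activity to revenue")
--     if 'data' in value_prop.lower() or 'analytics' in value_prop.lower():
--         props.append("The Data Silo Problem - Critical data trapped in disconnected tools")
--     if 'cost' in value_prop.lower() or 'expensive' in value_prop.lower():
--         props.append("The Cost Creep Crisis - Spend growing 3x faster than efficiency")
--     if 'fraud' in value_prop.lower() or 'security' in value_prop.lower():
--         props.append("The Security-UX Tradeoff - Lock down systems OR keep users happy")
--
--     # Fill to 3 props
--     while len(props) < 3:
--         props.append(f"The {company_data['Company Name']} Challenge - Specific pain point TBD")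
--
--     return props[:3]
-- ===== SOURCE B (Python) =====
-- _RULES = [
--     (('automate',), "The Manual Process Tax - Spending 20+ hrs/week on work that should be automated"),
--     (('scale', 'scaling'), "The Scaling Wall - What worked at 10X breaks at 100X"),
--     (('attribution', 'visibility'), "The Attribution Black Hole - Can't connect activity to revenue"),
--     (('data', 'analytics'), "The Data Silo Problem - Critical data trapped in disconnected tools"),
--     (('cost', 'expensive'), "The Cost Creep Crisis - Spend growing 3x faster than efficiency"),
--     (('fraud', 'security'), "The Security-UX Tradeoff - Lock down systems OR keep users happy"),
-- ]
--
-- def generate_value_props(company_data):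
--     """Generate 3 named value props based on ICP pain points"""
--     vp = company_data.get('Value_Proposition', '').lower()
--
--     def pick(rules, k):
--         # recursively collect exactly k props, stopping early once k are found
--         # and padding with the challenge line only when the rules run out
--         if k == 0:
--             return []
--         if not rules:
--             return [f"The {company_data['Company Name']} Challenge - Specific pain point TBD"] * k
--         (kws, msg), rest = rules[0], rules[1:]
--         if any(w in vp for w in kws):
--             return [msg] + pick(rest, k - 1)
--         return pick(rest, k)
--
--     return pick(_RULES, 3)
-- ===== Notes on version B (the rewrite author's own statement) =====
-- stated objective: alternative
-- what changed: Replaces A's build-all/pad/slice pipeline (six unconditional appends, a while fill loop, then props[:3]) with a recursive picker that walks a rule list with a countdown, stops as soon as 3 props are collected (it never examines later rules), and pads in its base case, so the result has exactly 3 elements by construction with no slicing.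
import Mathlib
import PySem

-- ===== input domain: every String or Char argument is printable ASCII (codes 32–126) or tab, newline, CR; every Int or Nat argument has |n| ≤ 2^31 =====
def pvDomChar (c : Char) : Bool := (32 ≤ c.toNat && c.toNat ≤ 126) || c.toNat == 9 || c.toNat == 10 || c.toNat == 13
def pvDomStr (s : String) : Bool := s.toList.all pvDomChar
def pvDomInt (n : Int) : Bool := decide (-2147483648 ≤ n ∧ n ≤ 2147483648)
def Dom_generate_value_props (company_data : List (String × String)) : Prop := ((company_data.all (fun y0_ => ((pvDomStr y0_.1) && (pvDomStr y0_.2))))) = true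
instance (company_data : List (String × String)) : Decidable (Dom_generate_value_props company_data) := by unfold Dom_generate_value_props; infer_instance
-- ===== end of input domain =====

-- One honest line: B replaces A's build-all / while-fill / slice pipeline by a recursive picker
-- with a countdown that stops once 3 props are collected and pads in its base case (alternative).

-- ===== PORT A =====
-- the f-string challenge line; where Python would raise KeyError (key absent, outside Pre_) we use "" via getD
def pvChallenge (company_data : List (String × String)) : String :=
  "The " ++ PySem.Dict.getD (PySem.Dict.mk company_data) "Company Name" "" ++ " Challenge - Specific pain point TBD"

-- while len(props) < 3: props.append(challenge)
def pvFillA (c : String) (props : List String) : List String :=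
  if props.length < 3 then pvFillA c (props ++ [c]) else props
termination_by 3 - props.length
decreasing_by simp_all; omega

def generate_value_props (company_data : List (String × String)) : List String :=
  let _icp := PySem.Dict.getD (PySem.Dict.mk company_data) "ICP" ""
  let value_prop := PySem.Dict.getD (PySem.Dict.mk company_data) "Value_Proposition" ""
  let props : List String := []
  let props := if PySem.Str.isIn "automate" (PySem.Str.lower value_prop) then
      props ++ ["The Manual Process Tax - Spending 20+ hrs/week on work that should be automated"] else props
  let props := if PySem.Str.isIn "scale" (PySem.Str.lower value_prop) || PySem.Str.isIn "scaling" (PySem.Str.lower value_prop) then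
      props ++ ["The Scaling Wall - What worked at 10X breaks at 100X"] else props
  let props := if PySem.Str.isIn "attribution" (PySem.Str.lower value_prop) || PySem.Str.isIn "visibility" (PySem.Str.lower value_prop) then
      props ++ ["The Attribution Black Hole - Can't connect activity to revenue"] else props
  let props := if PySem.Str.isIn "data" (PySem.Str.lower value_prop) || PySem.Str.isIn "analytics" (PySem.Str.lower value_prop) then
      props ++ ["The Data Silo Problem - Critical data trapped in disconnected tools"] else props
  let props := if PySem.Str.isIn "cost" (PySem.Str.lower value_prop) || PySem.Str.isIn "expensive" (PySem.Str.lower value_prop) then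
      props ++ ["The Cost Creep Crisis - Spend growing 3x faster than efficiency"] else props
  let props := if PySem.Str.isIn "fraud" (PySem.Str.lower value_prop) || PySem.Str.isIn "security" (PySem.Str.lower value_prop) then
      props ++ ["The Security-UX Tradeoff - Lock down systems OR keep users happy"] else props
  let props := pvFillA (pvChallenge company_data) props
  PySem.List.slice props none (some 3)

-- ===== PORT B =====
def pvRules : List (List String × String) :=
  [ (["automate"], "The Manual Process Tax - Spending 20+ hrs/week on work that should be automated"),
    (["scale", "scaling"], "The Scaling Wall - What worked at 10X breaks at 100X"),
    (["attribution", "visibility"], "The Attribution Black Hole - Can't connect activity to revenue"),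
    (["data", "analytics"], "The Data Silo Problem - Critical data trapped in disconnected tools"),
    (["cost", "expensive"], "The Cost Creep Crisis - Spend growing 3x faster than efficiency"),
    (["fraud", "security"], "The Security-UX Tradeoff - Lock down systems OR keep users happy") ]

-- Source B's inner recursive pick(rules, k)
def pvPick (vp : String) (company_data : List (String × String)) :
    List (List String × String) → Nat → List String
  | _, 0 => []
  | [], Nat.succ k => List.replicate (Nat.succ k) (pvChallenge company_data)
  | (kws, msg) :: rest, Nat.succ k =>
      if kws.any (fun w => PySem.Str.isIn w vp) then msg :: pvPick vp company_data rest k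
      else pvPick vp company_data rest (Nat.succ k)

def generate_value_props_alt (company_data : List (String × String)) : List String :=
  let vp := PySem.Str.lower (PySem.Dict.getD (PySem.Dict.mk company_data) "Value_Proposition" "")
  pvPick vp company_data pvRules 3

-- ===== PRECONDITION & SPEC =====
-- Pre_ excludes exactly the inputs on which the Python A raises KeyError: fewer than 3 of the six
-- keyword groups match the lowercased value proposition AND no "Company Name" key is present
-- (B raises the same KeyError there).
def Pre_generate_value_props (company_data : List (String × String)) : Prop :=
  (PySem.Dict.get? (PySem.Dict.mk company_data) "Company Name").isSome = true ∨
  3 ≤ (([["automate"], ["scale", "scaling"], ["attribution", "visibility"], ["data", "analytics"],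
        ["cost", "expensive"], ["fraud", "security"]] : List (List String)).filter
        (fun kws => kws.any (fun k =>
          PySem.Str.isIn k (PySem.Str.lower (PySem.Dict.getD (PySem.Dict.mk company_data) "Value_Proposition" ""))))).length
instance (company_data : List (String × String)) : Decidable (Pre_generate_value_props company_data) := by
  unfold Pre_generate_value_props; infer_instance

def pvWitness_generate_value_props : (List (String × String)) := [("Company Name", "Acme")]

def Spec_generate_value_props (company_data : List (String × String)) (out : List String) : Prop := out = generate_value_props_alt company_data
instance (company_data : List (String × String)) (out : List String) : Decidable (Spec_generate_value_props company_data out) := by unfold Spec_generate_value_props; infer_instance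

-- ===== CLAIM (what is proved, stated in full; the proofs are below) =====
def Claim_equal_generate_value_props : Prop := ∀ (company_data : List (String × String)), Dom_generate_value_props company_data → Pre_generate_value_props company_data → Spec_generate_value_props company_data (generate_value_props company_data)

-- ===== LEMMAS AND PROOFS =====

-- A's while-append fill loop is an arithmetic replicate fill
theorem pvFillA_eq (c : String) (props : List String) :
    pvFillA c props = props ++ List.replicate (3 - props.length) c := by
  match props with
  | [] => unfold pvFillA pvFillA pvFillA pvFillA; simp
  | [a] => unfold pvFillA pvFillA pvFillA; simp
  | [a, b] => unfold pvFillA pvFillA; simp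
  | a :: b :: d :: rest => unfold pvFillA; simp

-- ===== VERDICT (by name: the statement is the Claim_ definition above) =====
set_option maxHeartbeats 1000000 in
theorem generate_value_props_spec : Claim_equal_generate_value_props := by
  intro company_data _ _
  unfold Spec_generate_value_props generate_value_props generate_value_props_alt pvRules
  simp only [pvFillA_eq, pvPick, List.any_cons, List.any_nil, Bool.or_false]
  generalize pvChallenge company_data = c
  generalize PySem.Str.lower (PySem.Dict.getD (PySem.Dict.mk company_data) "Value_Proposition" "") = vp
  generalize PySem.Str.isIn "automate" vp = b1
  generalize (PySem.Str.isIn "scale" vp || PySem.Str.isIn "scaling" vp) = b2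
  generalize (PySem.Str.isIn "attribution" vp || PySem.Str.isIn "visibility" vp) = b3
  generalize (PySem.Str.isIn "data" vp || PySem.Str.isIn "analytics" vp) = b4
  generalize (PySem.Str.isIn "cost" vp || PySem.Str.isIn "expensive" vp) = b5
  generalize (PySem.Str.isIn "fraud" vp || PySem.Str.isIn "security" vp) = b6
  cases b1 <;> cases b2 <;> cases b3 <;> cases b4 <;> cases b5 <;> cases b6 <;> rfl
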